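-- pv_equiv track=rewrite | github.com/Zoey0X208/mma_eval_tmp | bad_case_analysis.py | is_significant_match
-- ===== SOURCE A (Python) =====
-- def is_significant_match(str1, str2):
--     """
--     str1: 人工标注
--     str2: 模型输出
--     判断是否有显著匹配：str1 中存在长度 ≥ max(10, len(str1)//2) 的子串出现在 str2 中
--     """
--     len1, len2 = len(str1), len(str2)
--     len3 = 10
--     if len1 < len3 or len2 < len3:
--         return (str1 == str2) or (str1 in str2)
--     min_len1 = max(len3, len1 // 2)
--     for i in range(len(str1) - min_len1 + 1):
--         substr = str1[i:i + min_len1]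
--         if substr in str2:
--             return True
--     return False
-- ===== SOURCE B (Python) =====
-- def is_significant_match(str1, str2):
--     # Length of the required common substring: the whole of str1 in the short
--     # case (str1 == str2 or str1 in str2  <=>  a common substring of full
--     # length len(str1) exists), else max(10, len(str1)//2).
--     L = len(str1) if len(str1) < 10 or len(str2) < 10 else max(10, len(str1) // 2)
--     # Longest-common-substring DP: prev[j+1] = length of the longest common
--     # suffix of the processed prefix of str1 and str2[:j+1].
--     prev = [0] * (len(str2) + 1)
--     best = 0
--     for c1 in str1:
--         cur = [0] + [p + 1 if c1 == c2 else 0 for c2, p in zip(str2, prev)]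
--         best = max(best, max(cur))
--         prev = cur
--     return best >= L
-- ===== Notes on version B (the rewrite author's own statement) =====
-- stated objective: alternative
-- what changed: Replaces A's enumeration of length-L windows of str1 each searched in str2 (and its separate short-string equality/containment branch) by a single longest-common-substring dynamic program over str1 x str2, returning best >= L with L unified to len(str1) in the short case; note the DP is slower in wall-clock Python on large inputs (interpreter-level rows vs C substring search).
import Mathlib
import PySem

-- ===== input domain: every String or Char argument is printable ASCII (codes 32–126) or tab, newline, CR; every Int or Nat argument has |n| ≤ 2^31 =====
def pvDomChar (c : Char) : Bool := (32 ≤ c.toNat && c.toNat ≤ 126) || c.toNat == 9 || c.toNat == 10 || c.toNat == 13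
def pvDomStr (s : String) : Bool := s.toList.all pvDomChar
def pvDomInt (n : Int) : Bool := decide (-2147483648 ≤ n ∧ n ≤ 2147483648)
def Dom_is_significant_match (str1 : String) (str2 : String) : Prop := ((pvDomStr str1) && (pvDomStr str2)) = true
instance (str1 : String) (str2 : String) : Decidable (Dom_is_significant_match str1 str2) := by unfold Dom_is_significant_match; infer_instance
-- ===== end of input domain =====

-- B replaces A's window enumeration + substring search by a longest-common-substring
-- dynamic program (best >= L); same return value proved for all inputs.

-- ===== PORT A =====
-- literal port of A on the List Char side; lengths are Nat, so Python's len1 // 2 is exact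
-- Nat division and range(len1 - min_len1 + 1) has a nonnegative bound (min_len1 ≤ len1 here);
-- str1[i:i+min_len1] = (drop i).take min_len1, 'in' = PySem.Chars.isIn.
def is_significant_match (str1 : String) (str2 : String) : Bool :=
  let s1 := str1.toList
  let s2 := str2.toList
  let len1 := s1.length
  let len2 := s2.length
  if len1 < 10 || len2 < 10 then
    decide (s1 = s2) || PySem.Chars.isIn s1 s2
  else
    let min_len1 := max 10 (len1 / 2)
    (List.range (len1 - min_len1 + 1)).any
      (fun i => PySem.Chars.isIn ((s1.drop i).take min_len1) s2)

-- ===== PORT B =====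
-- literal port of Source B: one DP row per character of str1; the Python list comprehension
-- over zip(str2, prev) is the zipWith, [0] + … is the cons, max(best, max(cur)) is the
-- max with the fold (cur is nonempty and starts with 0, so max(cur) = cur.foldl max 0).
def bRow (c1 : Char) (s2 : List Char) (prev : List Nat) : List Nat :=
  0 :: List.zipWith (fun c2 p => if c1 = c2 then p + 1 else 0) s2 prev

def dpStep (s2 : List Char) (st : List Nat × Nat) (c1 : Char) : List Nat × Nat :=
  let cur := bRow c1 s2 st.1
  (cur, max st.2 (cur.foldl max 0))

def is_significant_match_alt (str1 : String) (str2 : String) : Bool :=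
  let s1 := str1.toList
  let s2 := str2.toList
  let L := if s1.length < 10 || s2.length < 10 then s1.length
           else max 10 (s1.length / 2)
  let fin := s1.foldl (dpStep s2) (List.replicate (s2.length + 1) 0, 0)
  decide (L ≤ fin.2)

-- ===== PRECONDITION & SPEC =====
def Spec_is_significant_match (str1 : String) (str2 : String) (out : Bool) : Prop := out = is_significant_match_alt str1 str2
instance (str1 : String) (str2 : String) (out : Bool) : Decidable (Spec_is_significant_match str1 str2 out) := by unfold Spec_is_significant_match; infer_instance

-- ===== CLAIM (what is proved, stated in full; the proofs are below) =====
def Claim_equal_is_significant_match : Prop := ∀ (str1 : String) (str2 : String), Dom_is_significant_match str1 str2 → Spec_is_significant_match str1 str2 (is_significant_match str1 str2)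

-- ===== LEMMAS AND PROOFS =====

-- 'the two strings have a common substring of length L'
def hasCommon (s1 s2 : List Char) (L : Nat) : Prop :=
  ∃ w : List Char, w.length = L ∧ w <:+: s1 ∧ w <:+: s2

-- length of the longest common PREFIX (applied to reversed lists below)
def csr : List Char → List Char → Nat
  | x :: xs, y :: ys => if x = y then csr xs ys + 1 else 0
  | _, _ => 0

-- length of the longest common SUFFIX
def cslf (a b : List Char) : Nat := csr a.reverse b.reverse

lemma csr_nil_left (v : List Char) : csr [] v = 0 := by cases v <;> rfl

lemma csr_nil_right (u : List Char) : csr u [] = 0 := by cases u <;> rfl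

lemma csr_le_left (u v : List Char) : csr u v ≤ u.length := by
  induction u generalizing v with
  | nil => simp [csr_nil_left]
  | cons x xs ih =>
    cases v with
    | nil => simp [csr_nil_right]
    | cons y ys => simp only [csr]; split_ifs <;> simp [Nat.succ_le_succ (ih ys)]

lemma csr_take (u v : List Char) : u.take (csr u v) = v.take (csr u v) := by
  induction u generalizing v with
  | nil => simp [csr_nil_left]
  | cons x xs ih =>
    cases v with
    | nil => simp [csr_nil_right]
    | cons y ys =>
      simp only [csr]
      split_ifs with h
      · simp [List.take_succ_cons, h, ih ys]
      · simp

lemma le_csr (w u v : List Char) (h1 : w <+: u) (h2 : w <+: v) : w.length ≤ csr u v := by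
  induction w generalizing u v with
  | nil => simp
  | cons x xs ih =>
    obtain ⟨t1, rfl⟩ := h1
    obtain ⟨t2, h2'⟩ := h2
    cases v with
    | nil => simp at h2'
    | cons y ys =>
      obtain ⟨rfl, h2''⟩ : x = y ∧ xs ++ t2 = ys := by
        simpa using h2'
      have hrec : csr (x :: (xs ++ t1)) (x :: ys) = csr (xs ++ t1) ys + 1 := by
        rw [csr, if_pos rfl]
      simp only [List.cons_append, List.length_cons, hrec]
      exact Nat.succ_le_succ (ih (xs ++ t1) ys ⟨t1, rfl⟩ ⟨t2, h2''⟩)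

lemma cslf_snoc (a b : List Char) (x y : Char) :
    cslf (a ++ [x]) (b ++ [y]) = if x = y then cslf a b + 1 else 0 := by
  simp [cslf, csr]

lemma cslf_exists (a b : List Char) (m : Nat) (h : m ≤ cslf a b) :
    ∃ w : List Char, w.length = m ∧ w <:+ a ∧ w <:+ b := by
  refine ⟨(a.reverse.take m).reverse, ?_, ?_, ?_⟩
  · have hle : cslf a b ≤ a.length := by
      simpa using csr_le_left a.reverse b.reverse
    simp only [List.length_reverse, List.length_take]
    omega
  · rw [← List.reverse_prefix]
    simpa using List.take_prefix m a.reverse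
  · rw [← List.reverse_prefix]
    have heq : a.reverse.take m = b.reverse.take m := by
      have h1 : a.reverse.take m = (a.reverse.take (cslf a b)).take m := by
        rw [List.take_take, Nat.min_eq_left h]
      have h2 : b.reverse.take m = (b.reverse.take (cslf a b)).take m := by
        rw [List.take_take, Nat.min_eq_left h]
      have hct : a.reverse.take (cslf a b) = b.reverse.take (cslf a b) :=
        csr_take a.reverse b.reverse
      rw [h1, h2, hct]
    simpa [heq] using List.take_prefix m b.reverse

lemma cslf_ge (a b w : List Char) (h1 : w <:+ a) (h2 : w <:+ b) : w.length ≤ cslf a b := by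
  have := le_csr w.reverse a.reverse b.reverse
    (List.reverse_prefix.mpr h1) (List.reverse_prefix.mpr h2)
  simpa using this

-- suffix of a prefix is an infix
lemma suffix_take_infix (w l : List Char) (k : Nat) (h : w <:+ l.take k) : w <:+: l :=
  h.isInfix.trans (List.take_prefix k l).isInfix

lemma hasCommon_iff_cslf (s1 s2 : List Char) (L : Nat) :
    hasCommon s1 s2 L ↔ ∃ k j, L ≤ cslf (s1.take k) (s2.take j) := by
  constructor
  · rintro ⟨w, rfl, ⟨p1, t1, rfl⟩, ⟨p2, t2, rfl⟩⟩
    refine ⟨p1.length + w.length, p2.length + w.length, ?_⟩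
    have e1 : (p1 ++ w ++ t1).take (p1.length + w.length) = p1 ++ w := by
      rw [List.append_assoc, List.take_append, List.take_of_length_le (by omega),
        Nat.add_sub_cancel_left, List.take_left]
    have e2 : (p2 ++ w ++ t2).take (p2.length + w.length) = p2 ++ w := by
      rw [List.append_assoc, List.take_append, List.take_of_length_le (by omega),
        Nat.add_sub_cancel_left, List.take_left]
    rw [e1, e2]
    exact cslf_ge _ _ w ⟨p1, rfl⟩ ⟨p2, rfl⟩
  · rintro ⟨k, j, h⟩
    obtain ⟨w, hw, h1, h2⟩ := cslf_exists _ _ L h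
    exact ⟨w, hw, suffix_take_infix w s1 k h1, suffix_take_infix w s2 j h2⟩

-- fold-max facts
lemma le_foldl_max_init (l : List Nat) (b : Nat) : b ≤ l.foldl max b := by
  induction l generalizing b with
  | nil => simp
  | cons x xs ih => exact le_trans (Nat.le_max_left b x) (ih (max b x))

lemma le_foldl_max_of_mem (l : List Nat) (b x : Nat) (h : x ∈ l) : x ≤ l.foldl max b := by
  induction l generalizing b with
  | nil => simp at h
  | cons y ys ih =>
    rcases List.mem_cons.mp h with rfl | h'
    · exact le_trans (Nat.le_max_right b x) (le_foldl_max_init ys _)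
    · exact ih _ h'

lemma foldl_max_eq_or_mem (l : List Nat) (b : Nat) :
    l.foldl max b = b ∨ l.foldl max b ∈ l := by
  induction l generalizing b with
  | nil => simp
  | cons x xs ih =>
    rcases ih (max b x) with h | h
    · rcases max_choice b x with h' | h' <;> rw [List.foldl_cons, h, h']
      · exact Or.inl rfl
      · exact Or.inr (List.mem_cons_self ..)
    · exact Or.inr (List.mem_cons_of_mem x h)

-- the DP row after processing a is exactly the table of common-suffix lengths
lemma row_inv (s2 a : List Char) :
    (a.foldl (dpStep s2) (List.replicate (s2.length + 1) 0, 0)).1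
      = (List.range (s2.length + 1)).map (fun j => cslf a (s2.take j)) := by
  induction a using List.reverseRecOn with
  | nil =>
    simp [cslf, csr_nil_left, List.map_const']
  | append_singleton a c ih =>
    rw [List.foldl_append, List.foldl_cons, List.foldl_nil]
    show (bRow c s2 _) = _
    rw [ih]
    apply List.ext_getElem
    · simp [bRow]
    · intro i hi hi'
      simp only [List.length_range, List.length_map] at hi'
      match i with
      | 0 => simp [bRow, cslf, csr_nil_right]
      | j + 1 =>
        have hj : j < s2.length := by omega
        simp only [bRow, List.getElem_cons_succ, List.getElem_zipWith,
          List.getElem_map, List.getElem_range]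
        have hs : s2.take (j + 1) = s2.take j ++ [s2[j]] := by
          rw [List.take_add_one, List.getElem?_eq_getElem hj]; rfl
        have ha : a ++ [c] = a ++ [c] := rfl
        rw [hs, cslf_snoc]

-- the DP maximum is the maximum of all common-suffix lengths of prefixes
lemma best_inv (s2 a : List Char) :
    (∀ k j, cslf (a.take k) (s2.take j) ≤
        (a.foldl (dpStep s2) (List.replicate (s2.length + 1) 0, 0)).2) ∧
    (∃ k j, (a.foldl (dpStep s2) (List.replicate (s2.length + 1) 0, 0)).2
        = cslf (a.take k) (s2.take j)) := by
  induction a using List.reverseRecOn with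
  | nil =>
    constructor
    · intro k j; simp [cslf, csr_nil_left]
    · exact ⟨0, 0, by simp [cslf, csr_nil_left]⟩
  | append_singleton a c ih =>
    obtain ⟨ihc, ihs⟩ := ih
    have hrow := row_inv s2 a
    rw [List.foldl_append, List.foldl_cons, List.foldl_nil]
    set st := a.foldl (dpStep s2) (List.replicate (s2.length + 1) 0, 0) with hst
    simp only [dpStep]
    have hcur : bRow c s2 st.1
        = (List.range (s2.length + 1)).map (fun j => cslf (a ++ [c]) (s2.take j)) := by
      have := row_inv s2 (a ++ [c])
      rw [List.foldl_append, List.foldl_cons, List.foldl_nil] at this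
      exact this
    constructor
    · intro k j
      by_cases hk : k ≤ a.length
      · rw [List.take_append_of_le_length hk]
        exact le_trans (ihc k j) (Nat.le_max_left _ _)
      · have : (a ++ [c]).take k = a ++ [c] := by
          apply List.take_of_length_le; simp; omega
        rw [this]
        have hj : cslf (a ++ [c]) (s2.take j) = cslf (a ++ [c]) (s2.take (min j s2.length)) := by
          by_cases hjl : j ≤ s2.length
          · rw [Nat.min_eq_left hjl]
          · rw [Nat.min_eq_right (by omega), List.take_length,
              List.take_of_length_le (by omega)]
        rw [hj]
        have hmem : cslf (a ++ [c]) (s2.take (min j s2.length)) ∈ bRow c s2 st.1 := by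
          rw [hcur]
          exact List.mem_map_of_mem (List.mem_range.mpr (by omega))
        exact le_trans (le_foldl_max_of_mem _ 0 _ hmem) (Nat.le_max_right _ _)
    · rcases max_choice st.2 ((bRow c s2 st.1).foldl max 0) with hm | hm <;> rw [hm]
      · obtain ⟨k, j, hkj⟩ := ihs
        refine ⟨min k a.length, j, ?_⟩
        rw [List.take_append_of_le_length (Nat.min_le_right _ _)]
        rw [hkj]
        congr 1
        rw [List.take_eq_take_iff]; omega
      · rcases foldl_max_eq_or_mem (bRow c s2 st.1) 0 with h0 | hmem
        · exact ⟨0, 0, by rw [h0]; simp [cslf, csr_nil_left]⟩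
        · rw [hcur] at hmem
          obtain ⟨j, _, hj⟩ := List.mem_map.mp hmem
          exact ⟨a.length + 1, j, by
            rw [List.take_of_length_le (by simp), hcur]; exact hj.symm⟩

-- B's verdict is 'a common substring of length L exists'
lemma alt_iff (s2 a : List Char) (L : Nat) :
    L ≤ (a.foldl (dpStep s2) (List.replicate (s2.length + 1) 0, 0)).2
      ↔ hasCommon a s2 L := by
  obtain ⟨hc, k, j, hs⟩ := best_inv s2 a
  rw [hasCommon_iff_cslf]
  constructor
  · intro h; exact ⟨k, j, hs ▸ h⟩
  · rintro ⟨k', j', h⟩; exact le_trans h (hc k' j')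

-- an infix of full length is the whole list
lemma infix_full (w l : List Char) (h : w <:+: l) (hl : w.length = l.length) : w = l :=
  h.sublist.eq_of_length hl

-- the short branch of A is 'a common substring of full length len1 exists'
lemma smallBranch_iff (s1 s2 : List Char) :
    (decide (s1 = s2) || PySem.Chars.isIn s1 s2) = true ↔ hasCommon s1 s2 s1.length := by
  simp only [Bool.or_eq_true, decide_eq_true_eq, PySem.Chars.isIn_iff_infix]
  constructor
  · rintro (rfl | h)
    · exact ⟨s1, rfl, List.infix_refl s1, List.infix_refl s1⟩
    · exact ⟨s1, rfl, List.infix_refl s1, h⟩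
  · rintro ⟨w, hw, h1, h2⟩
    have : w = s1 := infix_full w s1 h1 hw
    subst this
    exact Or.inr h2

-- the window scan of A is 'a common substring of length L exists' (L ≤ len1)
lemma bigBranch_iff (s1 s2 : List Char) (L : Nat) (hL : L ≤ s1.length) :
    ((List.range (s1.length - L + 1)).any
        (fun i => PySem.Chars.isIn ((s1.drop i).take L) s2)) = true
      ↔ hasCommon s1 s2 L := by
  rw [List.any_eq_true]
  constructor
  · rintro ⟨i, hi, hin⟩
    have hi' : i < s1.length - L + 1 := List.mem_range.mp hi
    refine ⟨(s1.drop i).take L, ?_, ?_, (PySem.Chars.isIn_iff_infix _ _).mp hin⟩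
    · rw [List.length_take, List.length_drop]; omega
    · exact ((s1.drop i).take_prefix L).isInfix.trans (s1.drop_suffix i).isInfix
  · rintro ⟨w, hw, ⟨p, t, hpt⟩, h2⟩
    have hlen : s1.length = p.length + w.length + t.length := by
      rw [← hpt]; simp [List.length_append]; omega
    refine ⟨p.length, List.mem_range.mpr (by omega), ?_⟩
    have hdrop : s1.drop p.length = w ++ t := by
      rw [← hpt, List.append_assoc, List.drop_left]
    have htake : (s1.drop p.length).take L = w := by
      rw [hdrop, List.take_left' hw]
    rw [htake]
    exact (PySem.Chars.isIn_iff_infix _ _).mpr h2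

-- ===== VERDICT (by name: the statement is the Claim_ definition above) =====
theorem is_significant_match_spec : Claim_equal_is_significant_match := by
  intro str1 str2 _
  unfold Spec_is_significant_match is_significant_match is_significant_match_alt
  set s1 := str1.toList
  set s2 := str2.toList
  rw [Bool.eq_iff_iff]
  by_cases h : s1.length < 10 || s2.length < 10
  · simp only [h, if_true, decide_eq_true_eq]
    rw [smallBranch_iff s1 s2, ← alt_iff s2 s1 s1.length]
  · simp only [h, Bool.false_eq_true, if_false, decide_eq_true_eq]
    have h10 : 10 ≤ s1.length := by
      rcases Nat.lt_or_ge s1.length 10 with h' | h'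
      · exact absurd (by simp [h']) h
      · exact h'
    rw [bigBranch_iff s1 s2 _ (by omega), ← alt_iff s2 s1 _]
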